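-- pv_equiv track=rewrite | github.com/jmnavegomez/Logica-Computacional | pages/2_Tabla_Verdad.py | letrasSentencia
-- ===== SOURCE A (Python) =====
-- from collections import Counter
-- from string import ascii_uppercase as mayus
-- from string import ascii_lowercase as minus
--
-- def letrasSentencia(sentencia):
--     diccio = Counter(sentencia)
--     letras = []
--     for i in diccio:
--         if i in mayus or i in minus:
--             if i not in letras:
--                 letras.append(i)
--
--     return letras
-- ===== SOURCE B (Python) =====
-- from string import ascii_uppercase as mayus
-- from string import ascii_lowercase as minus
--
--
-- def letrasSentencia(sentencia):
--     presentes = [c for c in mayus + minus if c in sentencia]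
--     return sorted(presentes, key=sentencia.find)
-- ===== Notes on version B (the rewrite author's own statement) =====
-- stated objective: alternative
-- what changed: B inverts the traversal: instead of scanning the sentence's Counter keys and filtering them against the alphabet, it scans the fixed 52-letter alphabet, keeps the letters that occur in the sentence, and orders them by their first index via sorted(key=sentencia.find); the per-character Python-level dict build is replaced by 52 C-speed substring searches.
import Mathlib
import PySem

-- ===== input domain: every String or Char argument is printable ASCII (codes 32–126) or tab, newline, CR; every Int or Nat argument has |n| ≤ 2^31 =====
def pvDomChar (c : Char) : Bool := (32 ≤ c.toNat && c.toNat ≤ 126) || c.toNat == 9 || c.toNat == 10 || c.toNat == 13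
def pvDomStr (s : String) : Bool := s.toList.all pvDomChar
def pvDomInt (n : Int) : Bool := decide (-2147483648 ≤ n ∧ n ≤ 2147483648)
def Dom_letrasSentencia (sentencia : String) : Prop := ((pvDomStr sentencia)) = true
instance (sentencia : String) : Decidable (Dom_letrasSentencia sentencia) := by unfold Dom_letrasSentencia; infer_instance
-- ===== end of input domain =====

-- B replaces A's scan of the input's Counter keys by a scan of the 52-letter alphabet: it keeps
-- the letters that occur in the sentence and sorts them by their first index (str.find) in the
-- sentence (objective: alternative). Equivalence is exact; no precondition is needed.

-- ===== PORT A =====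
-- string.ascii_uppercase / string.ascii_lowercase
def pvMayus : List Char := "ABCDEFGHIJKLMNOPQRSTUVWXYZ".toList
def pvMinus : List Char := "abcdefghijklmnopqrstuvwxyz".toList

def letrasSentencia (sentencia : String) : List String :=
  let diccio := PySem.Dict.counter sentencia.toList
  (PySem.Dict.keys diccio).foldl
    (fun letras i =>
      if pvMayus.contains i || pvMinus.contains i then
        if !letras.contains (String.ofList [i]) then letras ++ [String.ofList [i]] else letras
      else letras)
    []

-- ===== PORT B =====
-- Source B: presentes = [c for c in mayus + minus if c in sentencia]; return sorted(presentes, key=sentencia.find)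
def letrasSentencia_alt (sentencia : String) : List String :=
  let presentes := ((pvMayus ++ pvMinus).map (fun c => String.ofList [c])).filter
      (fun c => PySem.Str.isIn c sentencia)
  PySem.List.sorted presentes (fun c => PySem.Str.find sentencia c) false

-- ===== PRECONDITION & SPEC =====
def Spec_letrasSentencia (sentencia : String) (out : List String) : Prop := out = letrasSentencia_alt sentencia
instance (sentencia : String) (out : List String) : Decidable (Spec_letrasSentencia sentencia out) := by unfold Spec_letrasSentencia; infer_instance

-- ===== CLAIM (what is proved, stated in full; the proofs are below) =====
def Claim_equal_letrasSentencia : Prop := ∀ (sentencia : String), Dom_letrasSentencia sentencia → Spec_letrasSentencia sentencia (letrasSentencia sentencia)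

-- ===== LEMMAS AND PROOFS =====

theorem pvStr_inj {a b : Char} (h : String.ofList [a] = String.ofList [b]) : a = b := by
  simpa using congrArg String.toList h

-- A's fold over a duplicate-free key list keeps exactly its letters, in order
theorem A_fold (ks : List Char) (s : List Char)
    (hdisj : ∀ c ∈ ks, c ∉ s) (hnd : ks.Nodup) :
    ks.foldl
      (fun letras i =>
        if pvMayus.contains i || pvMinus.contains i then
          if !letras.contains (String.ofList [i]) then letras ++ [String.ofList [i]] else letras
        else letras)
      (s.map (fun c => String.ofList [c]))
    = (s ++ ks.filter (fun c => pvMayus.contains c || pvMinus.contains c)).map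
        (fun c => String.ofList [c]) := by
  induction ks generalizing s with
  | nil => simp
  | cons c ks ih =>
    have hc_not_s : c ∉ s := hdisj c (by simp)
    have hnd' : ks.Nodup := (List.nodup_cons.mp hnd).2
    have hc_not_ks : c ∉ ks := (List.nodup_cons.mp hnd).1
    by_cases hc : (pvMayus.contains c || pvMinus.contains c) = true
    · have hnotmem : String.ofList [c] ∉ s.map (fun c => String.ofList [c]) := by
        simp only [List.mem_map]
        rintro ⟨d, hd, hde⟩
        exact hc_not_s (pvStr_inj hde ▸ hd)
      have hmap : s.map (fun c => String.ofList [c]) ++ [String.ofList [c]]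
          = (s ++ [c]).map (fun c => String.ofList [c]) := by simp
      rw [List.foldl_cons, if_pos hc, if_pos (by simp [hnotmem]), hmap,
        ih (s ++ [c]) (by
          intro d hd hmem
          rcases List.mem_append.mp hmem with h | h
          · exact hdisj d (by simp [hd]) h
          · simp at h; subst h; exact hc_not_ks hd) hnd']
      simp only [List.filter_cons, hc, if_pos, List.append_assoc, List.singleton_append]
    · rw [List.foldl_cons, if_neg hc, ih s (fun d hd => hdisj d (by simp [hd])) hnd']
      simp only [List.filter_cons, hc, Bool.false_eq_true, reduceIte]

-- first occurrence: any index holding c bounds idxOf c from above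
theorem idxOf_le_of_getElem? (l : List Char) (c : Char) (j : Nat)
    (h : l[j]? = some c) : l.idxOf c ≤ j := by
  induction l generalizing j with
  | nil => simp at h
  | cons a l ih =>
    cases j with
    | zero =>
      simp at h
      simp [h]
    | succ j =>
      by_cases hac : a = c
      · simp [hac]
      · simp only [List.getElem?_cons_succ] at h
        have := ih j h
        simp [hac]
        omega

-- str.find of a one-letter needle that occurs is the letter's first index
theorem find_singleton (l : List Char) (c : Char) (h : c ∈ l) :
    PySem.Chars.find l [c] = (l.idxOf c : Int) := by
  have hinf : [c] <:+: l := (List.singleton_infix_iff c l).mpr h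
  have hpos : 0 ≤ PySem.Chars.find l [c] := (PySem.Chars.find_nonneg_iff l [c]).mpr hinf
  obtain ⟨hpre, hmin⟩ := PySem.Chars.find_spec hpos
  set k := (PySem.Chars.find l [c]).toNat with hk
  -- [c] <+: l.drop i ↔ l[i]? = some c
  have hiff : ∀ i : Nat, ([c] <+: l.drop i) ↔ l[i]? = some c := by
    intro i
    constructor
    · rintro ⟨t, ht⟩
      have hh : (l.drop i).head? = some c := by rw [← ht]; rfl
      rwa [List.head?_drop] at hh
    · intro hi
      have hh : (l.drop i).head? = some c := by rwa [List.head?_drop]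
      rcases List.head?_eq_some_iff.mp hh with ⟨t, ht⟩
      exact ⟨t, by rw [ht]; rfl⟩
  have hk_at : l[k]? = some c := (hiff k).mp hpre
  have h1 : l.idxOf c ≤ k := idxOf_le_of_getElem? l c k hk_at
  have h2 : ¬ l.idxOf c < k := by
    intro hlt
    exact hmin _ hlt ((hiff _).mpr (by
      have hlen := List.idxOf_lt_length_of_mem h
      simp [List.getElem?_eq_getElem hlen, List.getElem_idxOf hlen]))
  have : l.idxOf c = k := by omega
  omega

-- the first-appearance dedup list is strictly increasing in first index
theorem ofList_pairwise_idxOf (l : List Char) :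
    (PySem.Set.ofList l).Pairwise (fun a b => l.idxOf a < l.idxOf b) := by
  induction l using List.reverseRecOn with
  | nil => simp [PySem.Set.ofList_eq_foldl]
  | append_singleton t c ih =>
    have hfold : PySem.Set.ofList (t ++ [c]) = PySem.Set.add (PySem.Set.ofList t) c := by
      rw [PySem.Set.ofList_eq_foldl, PySem.Set.ofList_eq_foldl, List.foldl_append]
      rfl
    have hmemS : ∀ a, a ∈ (PySem.Set.ofList t : List Char) → a ∈ t := by
      intro a ha; simpa using (PySem.Set.mem_ofList _ _).mp ha
    by_cases hc : c ∈ (PySem.Set.ofList t : List Char)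
    · rw [hfold, show PySem.Set.add (PySem.Set.ofList t) c = PySem.Set.ofList t by
        simp [PySem.Set.add, hc]]
      exact ih.imp_of_mem (fun {a b} ha hb hab => by
        rwa [List.idxOf_append_of_mem (hmemS a ha), List.idxOf_append_of_mem (hmemS b hb)])
    · have hct : c ∉ t := fun h => hc ((PySem.Set.mem_ofList _ _).mpr h)
      rw [hfold, show PySem.Set.add (PySem.Set.ofList t) c = PySem.Set.ofList t ++ [c] by
        simp [PySem.Set.add, hc]]
      rw [List.pairwise_append]
      refine ⟨ih.imp_of_mem (fun {a b} ha hb hab => by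
        rwa [List.idxOf_append_of_mem (hmemS a ha), List.idxOf_append_of_mem (hmemS b hb)]),
        List.pairwise_singleton _ _, ?_⟩
      intro a ha b hb
      simp at hb; subst hb
      have hat := hmemS a ha
      rw [List.idxOf_append_of_mem hat, List.idxOf_append_of_notMem hct]
      have := List.idxOf_lt_length_of_mem hat
      simp
      omega

-- ===== VERDICT (by name: the statement is the Claim_ definition above) =====
theorem letrasSentencia_spec : Claim_equal_letrasSentencia := by
  intro sentencia _
  show letrasSentencia sentencia = letrasSentencia_alt sentencia
  set l := sentencia.toList with hl
  have hA : letrasSentencia sentencia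
      = ((PySem.Set.ofList l).filter (fun c => pvMayus.contains c || pvMinus.contains c)).map
          (fun c => String.ofList [c]) := by
    show (PySem.Dict.keys (PySem.Dict.counter l)).foldl _ [] = _
    rw [PySem.Dict.keys_counter]
    have h := A_fold (PySem.Set.ofList l) []
      (by intro c _ h; simp at h) (PySem.Set.nodup_ofList _)
    simpa only [List.map_nil, List.nil_append] using h
  rw [hA]
  show _ = PySem.List.sorted _ _
  refine (PySem.List.sorted_eq_of_perm_of_pairwise_lt _ _ _ ?_ ?_).symm
  · -- permutation: both lists hold exactly the letters occurring in the sentence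
    refine (List.perm_ext_iff_of_nodup ?_ ?_).mpr ?_
    · exact ((PySem.Set.nodup_ofList l).filter _).map (fun a b hab => pvStr_inj hab)
    · refine List.Nodup.filter _ (List.Nodup.map (fun a b hab => pvStr_inj hab) ?_)
      decide
    · intro x
      simp only [List.mem_map, List.mem_filter, PySem.Set.mem_ofList]
      constructor
      · rintro ⟨c, ⟨hcl, hcp⟩, rfl⟩
        refine ⟨⟨c, ?_, rfl⟩, ?_⟩
        · simpa using hcp
        · rw [PySem.Str.isIn_iff_infix]
          simpa using (List.singleton_infix_iff c l).mpr hcl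
      · rintro ⟨⟨c, hca, rfl⟩, hin⟩
        rw [PySem.Str.isIn_iff_infix] at hin
        simp only [String.toList_ofList] at hin
        exact ⟨c, ⟨(List.singleton_infix_iff c l).mp hin, by simpa using hca⟩, rfl⟩
  · -- A's output is strictly increasing in sentencia.find
    rw [List.pairwise_map]
    refine (((ofList_pairwise_idxOf l).filter _).imp_of_mem ?_)
    intro a b ha hb hab
    have hal : a ∈ l := by
      have := (List.mem_filter.mp ha).1
      simpa using (PySem.Set.mem_ofList _ _).mp this
    have hbl : b ∈ l := by
      have := (List.mem_filter.mp hb).1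
      simpa using (PySem.Set.mem_ofList _ _).mp this
    show PySem.Str.find sentencia (String.ofList [a]) < PySem.Str.find sentencia (String.ofList [b])
    rw [PySem.Str.find_eq, PySem.Str.find_eq]
    simp only [String.toList_ofList]
    rw [← hl, find_singleton l a hal, find_singleton l b hbl]
    exact_mod_cast hab
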